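-- pv_equiv track=rewrite | github.com/HauaM/k-helpdesk-wiki | app/services/manual_service.py | parse_guideline_string
-- ===== SOURCE A (Python) =====
-- def parse_guideline_string(guideline_text: str) -> list[dict[str, str]]:
--     """
--     guideline 문자열을 파싱하여 제목/설명 배열로 변환.
--
--     포맷: "제목1\\n설명1\\n제목2\\n설명2" 또는 각 라인이 제목/설명 쌍으로 구성
--     """
--     if not guideline_text or not guideline_text.strip():
--         return []
--
--     lines = [line.strip() for line in guideline_text.split("\n") if line.strip()]
--
--     guidelines: list[dict[str, str]] = []
--     i = 0
--     while i < len(lines):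
--         if i + 1 < len(lines):
--             # 제목과 설명이 한 쌍
--             title = lines[i]
--             description = lines[i + 1]
--             guidelines.append({"title": title, "description": description})
--             i += 2
--         else:
--             # 남은 것이 제목만 있으면 설명은 공백
--             guidelines.append({"title": lines[i], "description": ""})
--             i += 1
--
--     return guidelines
-- ===== SOURCE B (Python) =====
-- def parse_guideline_string(guideline_text: str) -> list[dict[str, str]]:
--     if not guideline_text or not guideline_text.strip():
--         return []
--     lines = [line.strip() for line in guideline_text.split("\n") if line.strip()]
--     titles = [line for i, line in enumerate(lines) if i % 2 == 0]
--     descriptions = [line for i, line in enumerate(lines) if i % 2 == 1]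
--     return [{"title": t, "description": d} for t, d in zip(titles, descriptions + [""])]
-- ===== Notes on version B (the rewrite author's own statement) =====
-- stated objective: idiomatic
-- what changed: Replaced the index-walking while loop with its i+1<len lookahead and trailing special case by partitioning the stripped lines into even-index titles and odd-index descriptions and zipping titles with the descriptions padded by one empty string.
import Mathlib
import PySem

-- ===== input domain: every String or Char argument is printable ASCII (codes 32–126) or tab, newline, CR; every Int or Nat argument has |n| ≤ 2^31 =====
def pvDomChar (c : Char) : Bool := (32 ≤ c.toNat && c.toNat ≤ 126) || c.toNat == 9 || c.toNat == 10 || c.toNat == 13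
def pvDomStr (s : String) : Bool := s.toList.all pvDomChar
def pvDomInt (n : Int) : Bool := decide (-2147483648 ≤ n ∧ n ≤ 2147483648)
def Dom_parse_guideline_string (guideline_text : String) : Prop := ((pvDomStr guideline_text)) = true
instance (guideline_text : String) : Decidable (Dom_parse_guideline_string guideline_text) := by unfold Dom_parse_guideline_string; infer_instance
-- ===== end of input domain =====

-- B replaces A's index-walking while loop by parity-partitioning the lines and zipping
-- titles with the padded descriptions (objective: idiomatic; same cost).


-- ===== PORT A =====
-- the stripped, nonempty lines (shared line of both Pythons):
-- [line.strip() for line in guideline_text.split("\n") if line.strip()]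
def pvLines (guideline_text : String) : List String :=
  (((PySem.Str.split? guideline_text "\n").getD []).filter
    (fun line => PySem.Str.strip line ≠ "")).map PySem.Str.strip

-- A's while loop over lines: i+1 < len pairs two lines, else the lone title gets ""
def pvPairLoop : List String → List (List (String × String))
  | [] => []
  | [t] => [[("title", t), ("description", "")]]
  | t :: d :: rest => [("title", t), ("description", d)] :: pvPairLoop rest

def parse_guideline_string (guideline_text : String) : List (List (String × String)) :=
  if guideline_text = "" ∨ PySem.Str.strip guideline_text = "" then []
  else pvPairLoop (pvLines guideline_text)

-- ===== PORT B =====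
def parse_guideline_string_alt (guideline_text : String) : List (List (String × String)) :=
  if guideline_text = "" ∨ PySem.Str.strip guideline_text = "" then []
  else
    let lines := pvLines guideline_text
    let titles := (PySem.List.enumerate lines 0).filterMap
      (fun p => if p.1 % 2 == 0 then some p.2 else none)
    let descriptions := (PySem.List.enumerate lines 0).filterMap
      (fun p => if p.1 % 2 == 1 then some p.2 else none)
    (titles.zip (descriptions ++ [""])).map
      (fun p => [("title", p.1), ("description", p.2)])

-- ===== PRECONDITION & SPEC =====
def Spec_parse_guideline_string (guideline_text : String) (out : List (List (String × String))) : Prop := out = parse_guideline_string_alt guideline_text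
instance (guideline_text : String) (out : List (List (String × String))) : Decidable (Spec_parse_guideline_string guideline_text out) := by unfold Spec_parse_guideline_string; infer_instance

-- ===== CLAIM (what is proved, stated in full; the proofs are below) =====
def Claim_equal_parse_guideline_string : Prop := ∀ (guideline_text : String), Dom_parse_guideline_string guideline_text → Spec_parse_guideline_string guideline_text (parse_guideline_string guideline_text)

-- ===== LEMMAS AND PROOFS =====

-- the parity filters only depend on the start index mod 2
theorem pvFilterMap_enumerate_shift2 {α : Type} (r : Int) (l : List α) (s : Int) :
    (PySem.List.enumerate l (s + 2)).filterMap
      (fun p => if p.1 % 2 == r then some p.2 else none) =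
    (PySem.List.enumerate l s).filterMap
      (fun p => if p.1 % 2 == r then some p.2 else none) := by
  induction l generalizing s with
  | nil => simp [PySem.List.enumerate_nil]
  | cons a t ih =>
    simp only [PySem.List.enumerate_cons, List.filterMap_cons]
    have h2 : (s + 2) % 2 = s % 2 := by omega
    have h3 : s + 2 + 1 = s + 1 + 2 := by omega
    rw [h2, h3, ih]

theorem pvPairLoop_eq_zip (l : List String) :
    pvPairLoop l =
    (((PySem.List.enumerate l 0).filterMap
        (fun p => if p.1 % 2 == 0 then some p.2 else none)).zip
      (((PySem.List.enumerate l 0).filterMap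
        (fun p => if p.1 % 2 == 1 then some p.2 else none)) ++ [""])).map
      (fun p => [("title", p.1), ("description", p.2)]) := by
  induction l using pvPairLoop.induct with
  | case1 => simp [pvPairLoop, PySem.List.enumerate_nil]
  | case2 t =>
    simp [pvPairLoop, PySem.List.enumerate_cons, PySem.List.enumerate_nil]
  | case3 t d rest ih =>
    simp only [pvPairLoop, PySem.List.enumerate_cons, List.filterMap_cons,
      show (((0:Int)) % 2 == 0) = true from rfl, show (((0:Int)) % 2 == 1) = false from rfl,
      show (((0:Int) + 1) % 2 == 0) = false from rfl, show (((0:Int) + 1) % 2 == 1) = true from rfl,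
      reduceIte]
    rw [show (0:Int) + 1 + 1 = 0 + 2 from rfl, pvFilterMap_enumerate_shift2,
      pvFilterMap_enumerate_shift2, ih]
    simp [List.zip_cons_cons]

theorem parse_guideline_string_spec : Claim_equal_parse_guideline_string := by
  intro t _
  unfold Spec_parse_guideline_string parse_guideline_string parse_guideline_string_alt
  split_ifs with h
  · rfl
  · exact pvPairLoop_eq_zip (pvLines t)
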